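-- pv_equiv track=rewrite | github.com/BlueScreenMaker/Yeummy_Algorithm | Programmers/고득점 kit/해쉬/전화번호 목록.py | solution
-- ===== SOURCE A (Python) =====
-- from itertools import combinations
--
-- def solution(phone_book):
--     answer: bool = True
--     phone_book = sorted(phone_book)
--
--     for i in combinations(phone_book, 2):
--         if i[0] in i[1] and i[1][0] == i[0][0]:
--             answer = False
--             break
--
--     return answer
-- ===== SOURCE B (Python) =====
-- def solution(phone_book):
--     book = sorted(phone_book)
--     return all(not big.startswith(small) for small, big in zip(book, book[1:]))
-- ===== Notes on version B (the rewrite author's own statement) =====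
-- stated objective: simpler
-- what changed: Replaced the scan over all sorted pairs testing 'substring and same first character' by the canonical prefix check: sort once and test only adjacent pairs with startswith.
-- intended difference: On lists where some entry occurs as a substring (but not a prefix) of a lexicographically larger entry with the same first character while no entry is a prefix of another, A returns False although no phone number is a prefix of another; B returns True, the intended answer for the phone-number prefix-list check this code implements. — e.g. on solution(["10", "110"]): A returns false, B returns true
import Mathlib
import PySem

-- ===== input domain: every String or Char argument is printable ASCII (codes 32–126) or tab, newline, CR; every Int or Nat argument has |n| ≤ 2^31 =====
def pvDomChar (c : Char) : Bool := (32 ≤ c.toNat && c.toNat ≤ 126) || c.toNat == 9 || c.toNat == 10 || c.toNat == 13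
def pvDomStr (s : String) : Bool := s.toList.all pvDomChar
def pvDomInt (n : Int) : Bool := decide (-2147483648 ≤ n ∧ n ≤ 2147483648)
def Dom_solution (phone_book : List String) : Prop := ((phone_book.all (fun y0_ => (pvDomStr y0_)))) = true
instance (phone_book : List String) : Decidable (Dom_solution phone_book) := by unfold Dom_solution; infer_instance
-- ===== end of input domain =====

-- B replaces A's scan over all sorted pairs (substring + same first character) by the canonical
-- prefix-list check: sort once, test only adjacent pairs with startswith (simpler, and the
-- intended prefix semantics on the D_ corner stated below).
-- Both ports sort with key = String.toList: Python's string order is code-point lexicographic,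
-- which is exactly the lexicographic order on the character list (per the PySem str-comparison note).

-- ===== PORT A =====
-- the loop-body condition: i[0] in i[1] and i[1][0] == i[0][0]
def pairCond (i : List String) : Bool :=
  match PySem.List.pyGet? i 0, PySem.List.pyGet? i 1 with
  | some a, some b =>
      PySem.Str.isIn a b &&
        (match PySem.Str.pyGet? b 0, PySem.Str.pyGet? a 0 with
         | some cb, some ca => cb == ca
         | _, _ => false)   -- Python raises IndexError here; excluded by Pre_solution
  | _, _ => false

-- the for-loop with its break: the first pair satisfying the condition sets answer = False
def pairLoop : List (List String) → Bool
  | [] => true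
  | i :: rest => if pairCond i then false else pairLoop rest

def solution (phone_book : List String) : Bool :=
  let pb := @PySem.List.sorted String (List Char) List.instLinearOrder.toLT
    LinearOrder.toDecidableLT phone_book (fun s => s.toList) false
  pairLoop (PySem.List.combinations pb 2)

-- ===== PORT B =====
def solution_alt (phone_book : List String) : Bool :=
  let book := @PySem.List.sorted String (List Char) List.instLinearOrder.toLT
    LinearOrder.toDecidableLT phone_book (fun s => s.toList) false
  (book.zip (PySem.List.slice book (some 1) none)).all
    (fun p => ! PySem.Str.startswith p.2 p.1)

-- ===== PRECONDITION & SPEC =====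
-- Pre_ excludes exactly the inputs on which A raises IndexError: a list of length ≥ 2 containing "".
def Pre_solution (phone_book : List String) : Prop :=
  phone_book.length ≤ 1 ∨ "" ∉ phone_book
instance (phone_book : List String) : Decidable (Pre_solution phone_book) := by
  unfold Pre_solution; infer_instance

def pvWitness_solution : List String := (["119", "97674223", "1195524421"])

-- helpers for D_ (conditions on the input only; no port code)
def strFirstEq (a b : String) : Bool :=
  match a.toList.head?, b.toList.head? with
  | some x, some y => x == y
  | _, _ => false

-- a occurs inside b, with a ≤ b (code-point order) and the same (existing) first character:
-- the pair A's scan flags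
def quirkPair (a b : String) : Bool :=
  decide (a.toList ≤ b.toList) && PySem.Str.isIn a b && strFirstEq a b

-- a is a prefix of b — the pair the intended phone-number check flags
def prefixPair (a b : String) : Bool := PySem.Str.startswith b a

-- some pair of entries at distinct positions satisfies f (in either orientation)
def existsPair (f : String → String → Bool) : List String → Bool
  | [] => false
  | x :: xs => xs.any (fun y => f x y || f y x) || existsPair f xs


-- On lists where some entry occurs as a substring (but not a prefix) of a lexicographically larger
-- entry with the same first character while no entry is a prefix of another, A returns False although
-- no phone number is a prefix of another; B returns True, the intended answer for the prefix-list check.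
def D_solution (phone_book : List String) : Prop :=
  existsPair quirkPair phone_book = true ∧ existsPair prefixPair phone_book = false
instance (phone_book : List String) : Decidable (D_solution phone_book) := by
  unfold D_solution; infer_instance

def Spec_solution (phone_book : List String) (out : Bool) : Prop :=
  ¬ D_solution phone_book → out = solution_alt phone_book
instance (phone_book : List String) (out : Bool) : Decidable (Spec_solution phone_book out) := by
  unfold Spec_solution; infer_instance

def pvDiffWitness_solution : List String := (["10", "110"])
def pvDiffWitnessOut_solution : Bool × Bool := (false, true)

-- ===== CLAIM (what is proved, stated in full; the proofs are below) =====
def Claim_unchanged_solution : Prop := ∀ (phone_book : List String), Dom_solution phone_book → Pre_solution phone_book → Spec_solution phone_book (solution phone_book)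
def Claim_changed_solution : Prop := Dom_solution (pvDiffWitness_solution) ∧ Pre_solution (pvDiffWitness_solution) ∧ D_solution (pvDiffWitness_solution) ∧ solution (pvDiffWitness_solution) = pvDiffWitnessOut_solution.1 ∧ solution_alt (pvDiffWitness_solution) = pvDiffWitnessOut_solution.2 ∧ pvDiffWitnessOut_solution.1 ≠ pvDiffWitnessOut_solution.2
def Claim_exact_solution : Prop := ∀ (phone_book : List String), Dom_solution phone_book → Pre_solution phone_book → D_solution phone_book → solution phone_book ≠ solution_alt phone_book

-- ===== LEMMAS AND PROOFS =====

theorem existsPair_cons (f : String → String → Bool) (x : String) (xs : List String) :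
    existsPair f (x :: xs) = (xs.any (fun y => f x y || f y x) || existsPair f xs) := rfl

theorem pairLoop_eq_not_any (ps : List (List String)) : pairLoop ps = ! ps.any pairCond := by
  induction ps with
  | nil => rfl
  | cons i rest ih => cases h : pairCond i <;> simp [pairLoop, h, ih]


-- head-vs-tail scan matching combinations _ 2
def existsHT (f : String → String → Bool) : List String → Bool
  | [] => false
  | x :: xs => xs.any (f x) || existsHT f xs

theorem any_combinations_two (l : List String) :
    (PySem.List.combinations l 2).any pairCond = existsHT (fun a b => pairCond [a, b]) l := by
  induction l with
  | nil => rfl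
  | cons x xs ih =>
      rw [show (2 : Nat) = 1 + 1 from rfl, PySem.List.combinations_cons_succ,
        PySem.List.combinations_one]
      simp [List.any_append, List.any_map, existsHT, Function.comp_def, ih]

theorem solution_eq_not_existsHT (pb : List String) :
    solution pb = ! existsHT (fun a b => pairCond [a, b])
      (@PySem.List.sorted String (List Char) List.instLinearOrder.toLT
        LinearOrder.toDecidableLT pb (fun s => s.toList) false) := by
  simp [solution, pairLoop_eq_not_any, any_combinations_two]

theorem solution_alt_eq_adj (pb : List String) :
    solution_alt pb =
      ((@PySem.List.sorted String (List Char) List.instLinearOrder.toLT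
        LinearOrder.toDecidableLT pb (fun s => s.toList) false).zip
        (@PySem.List.sorted String (List Char) List.instLinearOrder.toLT
        LinearOrder.toDecidableLT pb (fun s => s.toList) false).tail).all
        (fun p => ! PySem.Str.startswith p.2 p.1) := by
  simp [solution_alt, PySem.List.slice_from_one]

-- list-level facts

theorem existsPair_perm {f : String → String → Bool} {l l' : List String}
    (h : l.Perm l') : existsPair f l = existsPair f l' := by
  induction h with
  | nil => rfl
  | cons x h ih => simp only [existsPair, ih, List.Perm.any_eq h]
  | swap x y l =>
      simp only [existsPair, List.any_cons]
      cases f x y <;> cases f y x <;> simp <;>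
        cases existsPair f l <;> simp [Bool.or_comm]
  | trans _ _ ih1 ih2 => exact ih1.trans ih2

theorem existsPair_mono {f g : String → String → Bool} {l : List String}
    (h : ∀ a ∈ l, ∀ b ∈ l, f a b = true → g a b = true)
    (hf : existsPair f l = true) : existsPair g l = true := by
  induction l with
  | nil => simp [existsPair] at hf
  | cons x xs ih =>
      simp only [existsPair, List.any_eq_true, Bool.or_eq_true] at hf ⊢
      rcases hf with ⟨y, hy, hfy⟩ | hrest
      · refine Or.inl ⟨y, hy, ?_⟩
        rcases hfy with h1 | h1
        · exact Or.inl (h x (by simp) y (by simp [hy]) h1)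
        · exact Or.inr (h y (by simp [hy]) x (by simp) h1)
      · exact Or.inr (ih (fun a ha b hb => h a (by simp [ha]) b (by simp [hb])) hrest)

theorem existsPair_two_le {f : String → String → Bool} {l : List String}
    (h : existsPair f l = true) : 2 ≤ l.length := by
  induction l with
  | nil => simp [existsPair] at h
  | cons x xs ih =>
      simp only [existsPair, List.any_eq_true, Bool.or_eq_true] at h
      rcases h with ⟨y, hy, _⟩ | h
      · have := List.length_pos_of_mem hy; simp; omega
      · have := ih h; simp; omega

-- code-point-order facts on List Char

theorem nil_le_chars (b : List Char) : ([] : List Char) ≤ b := by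
  cases b with
  | nil => exact le_refl _
  | cons x l => exact le_of_lt (by exact List.Lex.nil)

theorem cons_le_cons_head_chars {x z : Char} {a c : List Char} (h : x :: a ≤ z :: c) : x ≤ z := by
  rw [le_iff_lt_or_eq] at h
  rcases h with h | h
  · exact List.head_le_of_lt h
  · injection h with h1 _; exact le_of_eq h1

theorem cons_le_cons_iff_chars (x : Char) (a c : List Char) : x :: a ≤ x :: c ↔ a ≤ c := by
  rw [le_iff_lt_or_eq, le_iff_lt_or_eq, List.cons_lt_cons_iff]
  constructor
  · rintro ((h | ⟨-, h⟩) | h)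
    · exact absurd h (lt_irrefl x)
    · exact Or.inl h
    · injection h with _ h2; exact Or.inr h2
  · rintro (h | rfl)
    · exact Or.inl (Or.inr ⟨rfl, h⟩)
    · exact Or.inr rfl

theorem prefix_le_chars (a b : List Char) (h : a <+: b) : a ≤ b := by
  induction a generalizing b with
  | nil => exact nil_le_chars b
  | cons x a' ih =>
      rcases h with ⟨t, rfl⟩
      simp only [List.cons_append]
      exact List.cons_le_cons x (ih (a' ++ t) ⟨t, rfl⟩)

theorem between_prefix_chars (a c b : List Char) (h : a <+: b)
    (hac : a ≤ c) (hcb : c ≤ b) : a <+: c := by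
  induction a generalizing b c with
  | nil => exact List.nil_prefix
  | cons x a' ih =>
      rcases h with ⟨t, rfl⟩
      simp only [List.cons_append] at hcb
      cases c with
      | nil =>
          have hlt : ([] : List Char) < x :: a' := by exact List.Lex.nil
          exact absurd (lt_of_lt_of_le hlt hac) (lt_irrefl _)
      | cons z c' =>
          have hxz : x = z :=
            le_antisymm (cons_le_cons_head_chars hac) (cons_le_cons_head_chars hcb)
          subst hxz
          have h1 : a' ≤ c' := (cons_le_cons_iff_chars x a' c').mp hac
          have h2 : c' ≤ a' ++ t := (cons_le_cons_iff_chars x c' (a' ++ t)).mp hcb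
          exact (List.prefix_cons_inj x).mpr (ih c' (a' ++ t) ⟨t, rfl⟩ h1 h2)

-- bridging small helpers

theorem pyGet?_zero_eq_head? (s : String) : PySem.Str.pyGet? s 0 = s.toList.head? := by
  cases h : s.toList <;> simp [pysem, h]

theorem startswith_iff_prefix (s p : String) :
    PySem.Str.startswith s p = true ↔ p.toList <+: s.toList := by
  rw [PySem.Str.startswith_eq]; exact PySem.Chars.startswith_iff _ _

theorem toList_eq_nil_iff_empty (s : String) : s.toList = [] ↔ s = "" := by
  constructor
  · intro h; exact String.toList_inj.mp (by simpa using h)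
  · intro h; subst h; simp

-- pointwise: for x ≤ y (code-point order), A's pair condition is the quirk condition
theorem pairCond_pair_eq (x y : String) (hxy : x.toList ≤ y.toList) :
    pairCond [x, y] = (quirkPair x y || quirkPair y x) := by
  have hget : ∀ i : List String, i = [x, y] →
      pairCond i = (PySem.Str.isIn x y &&
        (match PySem.Str.pyGet? y 0, PySem.Str.pyGet? x 0 with
         | some cb, some ca => cb == ca
         | _, _ => false)) := by
    intro i hi; subst hi; rfl
  rw [hget [x, y] rfl]
  rcases eq_or_lt_of_le hxy with heq | hlt
  · have hxy' : x = y := by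
      exact String.toList_inj.mp heq
    subst hxy'
    simp only [quirkPair, Bool.or_self]
    rw [pyGet?_zero_eq_head?]
    cases h : x.toList.head? with
    | none => simp [strFirstEq, h]
    | some c => simp [strFirstEq, h]
  · have h1 : decide (x.toList ≤ y.toList) = true := decide_eq_true hxy
    have h2 : decide (y.toList ≤ x.toList) = false :=
      decide_eq_false (not_le_of_gt hlt)
    simp only [quirkPair, h1, h2, Bool.false_and, Bool.or_false, Bool.true_and]
    rw [pyGet?_zero_eq_head?, pyGet?_zero_eq_head?]
    simp only [strFirstEq]
    cases hx : x.toList.head? with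
    | none => simp
    | some cx =>
        cases hy : y.toList.head? with
        | none => simp
        | some cy => simp [beq_eq_decide, eq_comm]

-- A's head/tail scan on the sorted list computes existsPair quirkPair
theorem existsHT_eq_existsPair {s : List String}
    (hs : s.Pairwise (fun a b => a.toList ≤ b.toList)) :
    existsHT (fun a b => pairCond [a, b]) s = existsPair quirkPair s := by
  induction s with
  | nil => rfl
  | cons x xs ih =>
      rcases List.pairwise_cons.mp hs with ⟨hx, hxs⟩
      simp only [existsHT, existsPair]
      rw [ih hxs, PySem.List.any_congr_mem (fun y hy => pairCond_pair_eq x y (hx y hy))]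

-- B's adjacent scan on the sorted list computes existsPair prefixPair
theorem adj_eq_existsPair {s : List String}
    (hs : s.Pairwise (fun a b => a.toList ≤ b.toList)) :
    (s.zip s.tail).all (fun p => ! PySem.Str.startswith p.2 p.1)
      = ! existsPair prefixPair s := by
  induction s with
  | nil => rfl
  | cons x xs ih =>
      rcases List.pairwise_cons.mp hs with ⟨hx, hxs⟩
      cases xs with
      | nil => rfl
      | cons y t =>
          have hQ : ((y :: t).any fun z => prefixPair x z || prefixPair z x)
              = PySem.Str.startswith y x := by
            cases hp : PySem.Str.startswith y x with
            | true =>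
                have : prefixPair x y = true := hp
                simp [List.any_cons, this]
            | false =>
                rw [List.any_eq_false]
                intro z hz hor
                have hxz : x.toList ≤ z.toList := hx z hz
                have hyz : y.toList ≤ z.toList := by
                  rcases List.mem_cons.mp hz with rfl | hz
                  · exact le_refl _
                  · exact (List.pairwise_cons.mp hxs).1 z hz
                have hxy : x.toList ≤ y.toList := hx y (by simp)
                -- either orientation of the hit forces x to be a prefix of y
                have hpx : x.toList <+: y.toList := by
                  cases hzx : prefixPair x z with
                  | true =>
                      exact between_prefix_chars _ _ _
                        ((startswith_iff_prefix z x).mp hzx) hxy hyz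
                  | false =>
                      have hzx2 : prefixPair z x = true := by simpa [hzx] using hor
                      have hle := prefix_le_chars _ _ ((startswith_iff_prefix x z).mp hzx2)
                      have hEq : x.toList = z.toList := le_antisymm hxz hle
                      exact between_prefix_chars _ _ _
                        (hEq ▸ List.prefix_refl _) hxy hyz
                rw [← startswith_iff_prefix, hp] at hpx
                exact absurd hpx (by simp)
          rw [existsPair_cons]
          simp only [List.tail_cons] at ih
          rw [hQ, List.tail_cons, List.zip_cons_cons, List.all_cons, ih hxs]
          cases PySem.Str.startswith y x <;>
            cases existsPair prefixPair (y :: t) <;> simp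

-- a prefix pair among nonempty strings is a quirk pair
theorem prefix_imp_quirk {l : List String} (hne : "" ∉ l)
    (h : existsPair prefixPair l = true) : existsPair quirkPair l = true := by
  refine existsPair_mono (fun a ha b hb hab => ?_) h
  have hpre : a.toList <+: b.toList := (startswith_iff_prefix b a).mp hab
  have hale : a.toList ≤ b.toList := prefix_le_chars _ _ hpre
  have hane : a.toList ≠ [] := by
    intro hnil
    exact hne (((toList_eq_nil_iff_empty a).mp hnil) ▸ ha)
  simp only [quirkPair, Bool.and_eq_true, decide_eq_true_eq]
  refine ⟨⟨hale, ?_⟩, ?_⟩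
  · rw [PySem.Str.isIn_iff_infix]; exact hpre.isInfix
  · cases ha' : a.toList with
    | nil => exact absurd ha' hane
    | cons c ca =>
        rcases hpre with ⟨t, ht⟩
        rw [ha'] at ht
        simp [strFirstEq, ha', ← ht]

theorem solution_char (pb : List String) :
    solution pb = ! existsPair quirkPair pb := by
  rw [solution_eq_not_existsHT,
    existsHT_eq_existsPair (PySem.List.sorted_pairwise pb (fun s => s.toList))]
  have hperm : (@PySem.List.sorted String (List Char) List.instLinearOrder.toLT
      LinearOrder.toDecidableLT pb (fun s => s.toList) false).Perm pb :=
    @PySem.List.sorted_perm String (List Char) List.instLinearOrder.toLT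
      LinearOrder.toDecidableLT pb (fun s => s.toList) false
  rw [existsPair_perm (f := quirkPair) hperm]

theorem solution_alt_char (pb : List String) :
    solution_alt pb = ! existsPair prefixPair pb := by
  rw [solution_alt_eq_adj,
    adj_eq_existsPair (PySem.List.sorted_pairwise pb (fun s => s.toList))]
  have hperm : (@PySem.List.sorted String (List Char) List.instLinearOrder.toLT
      LinearOrder.toDecidableLT pb (fun s => s.toList) false).Perm pb :=
    @PySem.List.sorted_perm String (List Char) List.instLinearOrder.toLT
      LinearOrder.toDecidableLT pb (fun s => s.toList) false
  rw [existsPair_perm (f := prefixPair) hperm]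

-- ===== VERDICT (by name: the statement is the Claim_ definition above) =====
theorem solution_spec : Claim_unchanged_solution := by
  intro pb _ hpre hnD
  rw [solution_char, solution_alt_char]
  by_cases hq : existsPair quirkPair pb = true
  · have hp : existsPair prefixPair pb = true := by
      by_contra hp
      exact hnD ⟨hq, by simpa using hp⟩
    rw [hq, hp]
  · have hq' : existsPair quirkPair pb = false := by simpa using hq
    have hp : existsPair prefixPair pb = false := by
      by_contra hp
      have hp' : existsPair prefixPair pb = true := by simpa using hp
      have hlen := existsPair_two_le hp'
      have hne : "" ∉ pb := by
        rcases hpre with h | h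
        · omega
        · exact h
      exact hq (prefix_imp_quirk hne hp')
    rw [hq', hp]

theorem solution_changed : Claim_changed_solution := by
  unfold Claim_changed_solution; decide

theorem solution_tight : Claim_exact_solution := by
  intro pb _ _ hD
  rw [solution_char, solution_alt_char, hD.1, hD.2]
  decide
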